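-- pv_equiv track=rewrite | github.com/smenon8/AnimalPhotoBias | script/UploadAndDetectIBEIS.py | handle_name_logic
-- ===== SOURCE A (Python) =====
-- def handle_name_logic(cluster_dict, aid):
--     name = None
--     prev_match = False
--
--     # case 1: there is just 1 entry in the orig_name_list - no matches
--     if len(cluster_dict['orig_name_list']) == 1:
--         name = str(aid)
--     else:
--         # case 2: There are some matches
--         for i in range(len(cluster_dict['orig_name_list'])):
--             if 'NEWNAME' not in cluster_dict['orig_name_list'][i]:
--                 prev_match = True
--
--         if prev_match:
--             for orig_name in cluster_dict['orig_name_list']: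
--                 if 'NEWNAME' not in orig_name:
--                     name = orig_name
--         else:
--             # case 2b: But none of the matches have been previously been assigned a name
--             # This block will only work when the pipeline is being run for the first time on a dataset.
--             name = str(aid)
--
--     return name
-- ===== SOURCE B (Python) =====
-- def handle_name_logic(cluster_dict, aid):
--     names = cluster_dict['orig_name_list']
--
--     def last_match(i):
--         # recursive backward scan with early exit: first non-NEWNAME from the right
--         if i < 0:
--             return str(aid)
--         if 'NEWNAME' not in names[i]:
--             return names[i]
--         return last_match(i - 1)
--
--     if len(names) == 1:
--         return str(aid)
--     return last_match(len(names) - 1)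
-- ===== Notes on version B (the rewrite author's own statement) =====
-- stated objective: alternative
-- what changed: Replaces A's two full forward scans (a flag loop plus a last-match loop) with a single recursive backward scan that early-exits at the first non-NEWNAME entry from the right, falling back to str(aid) when the recursion bottoms out.
import Mathlib
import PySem

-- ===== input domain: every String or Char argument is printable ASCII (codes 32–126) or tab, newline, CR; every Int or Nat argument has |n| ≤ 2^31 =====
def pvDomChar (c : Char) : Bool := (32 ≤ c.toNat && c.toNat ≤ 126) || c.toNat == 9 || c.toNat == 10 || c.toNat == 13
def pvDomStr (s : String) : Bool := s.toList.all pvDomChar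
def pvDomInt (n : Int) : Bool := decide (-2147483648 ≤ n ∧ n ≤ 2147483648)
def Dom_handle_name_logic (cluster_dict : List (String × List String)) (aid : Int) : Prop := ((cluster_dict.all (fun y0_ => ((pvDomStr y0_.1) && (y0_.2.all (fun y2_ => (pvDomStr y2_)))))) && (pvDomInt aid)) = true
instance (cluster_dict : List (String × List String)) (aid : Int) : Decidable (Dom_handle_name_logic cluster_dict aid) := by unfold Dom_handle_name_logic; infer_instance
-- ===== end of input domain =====

-- ===== PORT A =====
-- B replaces A's two forward scans with one recursive backward scan, early-exiting on the
-- first non-NEWNAME entry from the right; same return value.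
def handle_name_logic (cluster_dict : List (String × List String)) (aid : Int) : Option String :=
  match cluster_dict.lookup "orig_name_list" with
  | none => none  -- Python raises KeyError here; excluded by Pre_
  | some lst =>
    if lst.length = 1 then some (PySem.Int.toStr aid)
    else
      -- for i in range(len(lst)): if 'NEWNAME' not in lst[i]: prev_match = True
      let prev_match := (PySem.List.pyRange 0 lst.length 1).foldl
        (fun pm i => if !PySem.Str.isIn "NEWNAME" (PySem.List.pyGetD lst i "") then true else pm) false
      if prev_match then
        -- for orig_name in lst: if 'NEWNAME' not in orig_name: name = orig_name
        lst.foldl (fun nm s => if !PySem.Str.isIn "NEWNAME" s then some s else nm) none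
      else some (PySem.Int.toStr aid)

-- ===== PORT B =====
-- Source B's `last_match(i)` walks indices len-1, len-2, …; here that right-to-left walk is the
-- structural recursion over the reversed list (same visit order, same early exit).
def hnlLastMatch (aid : Int) : List String → String
  | [] => PySem.Int.toStr aid
  | n :: rest => if !PySem.Str.isIn "NEWNAME" n then n else hnlLastMatch aid rest

def handle_name_logic_alt (cluster_dict : List (String × List String)) (aid : Int) : Option String :=
  match cluster_dict.lookup "orig_name_list" with
  | none => none  -- Python raises KeyError here; excluded by Pre_
  | some names =>
    if names.length = 1 then some (PySem.Int.toStr aid)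
    else some (hnlLastMatch aid names.reverse)

-- ===== PRECONDITION & SPEC =====
-- Pre_ excludes exactly the dicts without key 'orig_name_list', on which Python A raises KeyError.
def Pre_handle_name_logic (cluster_dict : List (String × List String)) (aid : Int) : Prop :=
  (cluster_dict.lookup "orig_name_list").isSome
instance (cluster_dict : List (String × List String)) (aid : Int) : Decidable (Pre_handle_name_logic cluster_dict aid) := by unfold Pre_handle_name_logic; infer_instance

def pvWitness_handle_name_logic : (List (String × List String)) × Int :=
  ([("orig_name_list", ["zebra", "NEWNAME_3", "giraffe"])], 7)

def Spec_handle_name_logic (cluster_dict : List (String × List String)) (aid : Int) (out : Option String) : Prop := out = handle_name_logic_alt cluster_dict aid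
instance (cluster_dict : List (String × List String)) (aid : Int) (out : Option String) : Decidable (Spec_handle_name_logic cluster_dict aid out) := by unfold Spec_handle_name_logic; infer_instance

-- ===== CLAIM (what is proved, stated in full; the proofs are below) =====
def Claim_equal_handle_name_logic : Prop := ∀ (cluster_dict : List (String × List String)) (aid : Int), Dom_handle_name_logic cluster_dict aid → Pre_handle_name_logic cluster_dict aid → Spec_handle_name_logic cluster_dict aid (handle_name_logic cluster_dict aid)

-- ===== LEMMAS AND PROOFS =====

-- A's flag loop computes List.any.
theorem foldl_flag_eq_any (q : String → Bool) (lst : List String) (b : Bool) :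
    lst.foldl (fun pm s => if !q s then true else pm) b
      = (b || lst.any (fun s => !q s)) := by
  induction lst generalizing b with
  | nil => simp
  | cons x xs ih =>
    rw [List.foldl_cons, List.any_cons, ih]
    by_cases h : (!q x) = true <;> cases b <;> simp [h]

-- A's last-match loop is the last element of the filtered list.
theorem foldl_last_match (q : String → Bool) (lst : List String) (init : Option String) :
    lst.foldl (fun nm s => if !q s then some s else nm) init
      = ((lst.filter (fun s => !q s)).getLast?).elim init some := by
  induction lst generalizing init with
  | nil => rfl
  | cons x xs ih =>
    by_cases h : (!q x) = true
    · rw [List.foldl_cons, if_pos h, List.filter_cons, if_pos h, ih]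
      cases hx : (xs.filter (fun s => !q s)).getLast? with
      | none =>
        rw [List.getLast?_eq_none_iff.mp hx]
        rfl
      | some v =>
        have h2 : (x :: xs.filter (fun s => !q s)).getLast? = some v := by
          cases hnil : xs.filter (fun s => !q s) with
          | nil => rw [hnil] at hx; exact absurd hx (by simp)
          | cons a l => rw [List.getLast?_cons_cons, ← hnil]; exact hx
        rw [h2]
        rfl
    · rw [List.foldl_cons, if_neg h, List.filter_cons, if_neg h, ih]

-- B's backward scan is the head of the filtered list, with str(aid) as fallback.
theorem hnlLastMatch_eq_head (aid : Int) (l : List String) :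
    hnlLastMatch aid l
      = ((l.filter (fun s => !PySem.Str.isIn "NEWNAME" s)).head?).getD (PySem.Int.toStr aid) := by
  induction l with
  | nil => rfl
  | cons x xs ih =>
    by_cases h : (!PySem.Str.isIn "NEWNAME" x) = true
    · rw [hnlLastMatch, if_pos h, List.filter_cons, if_pos h, List.head?_cons, Option.getD_some]
    · rw [hnlLastMatch, if_neg (by simpa using h), List.filter_cons, if_neg (by simpa using h)]
      exact ih

-- ===== VERDICT (by name: the statement is the Claim_ definition above) =====
theorem handle_name_logic_spec : Claim_equal_handle_name_logic := by
  intro cd aid _ hpre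
  unfold Spec_handle_name_logic handle_name_logic handle_name_logic_alt
  cases hl : cd.lookup "orig_name_list" with
  | none => simp [Pre_handle_name_logic, hl] at hpre
  | some lst =>
    by_cases h1 : lst.length = 1
    · simp [h1]
    · simp only [h1, if_false]
      rw [PySem.List.foldl_pyRange_zero_pyGetD' lst ""
        (fun pm s => if !PySem.Str.isIn "NEWNAME" s then true else pm) false]
      rw [foldl_flag_eq_any (fun s => PySem.Str.isIn "NEWNAME" s) lst false,
        foldl_last_match (fun s => PySem.Str.isIn "NEWNAME" s) lst none,
        Bool.false_or, hnlLastMatch_eq_head, List.filter_reverse, List.head?_reverse]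
      by_cases hany : lst.any (fun s => !PySem.Str.isIn "NEWNAME" s) = true
      · have hne : lst.filter (fun s => !PySem.Str.isIn "NEWNAME" s) ≠ [] := by
          rw [ne_eq, List.filter_eq_nil_iff]
          simp only [List.any_eq_true] at hany
          obtain ⟨x, hx, hqx⟩ := hany
          exact fun h => absurd hqx (by simpa using h x hx)
        rw [if_pos hany]
        cases hx : (lst.filter (fun s => !PySem.Str.isIn "NEWNAME" s)).getLast? with
        | none => exact absurd (List.getLast?_eq_none_iff.mp hx) hne
        | some v => rfl
      · have hnil : lst.filter (fun s => !PySem.Str.isIn "NEWNAME" s) = [] := by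
          rw [List.filter_eq_nil_iff]
          intro x hx hqx
          exact hany (List.any_eq_true.mpr ⟨x, hx, hqx⟩)
        rw [if_neg hany, hnil]
        rfl
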